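-- pv_equiv track=rewrite | github.com/Adam37a/datacamp_efrei | model/predict_pipeline.py | preprocess_text
-- ===== SOURCE A (Python) =====
-- positive_keywords = ["excellent", "superb", "amazing", "fast", "great"]
--
-- negative_keywords = ["bad", "terrible", "horrible", "slow", "poor"]
--
-- def preprocess_text(text):
--     """
--     Prétraite un texte en accentuant les mots-clés et en ajoutant du contexte.
--     """
--     if not isinstance(text, str):
--         return "Avis non fourni"  # Texte par défaut si le texte est invalide
--
--     # Accentuer les mots-clés
--     for word in positive_keywords:
--         text = text.replace(word, f"**{word.upper()}**")
--     for word in negative_keywords: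
--         text = text.replace(word, f"__{word.upper()}__")
--
--     # Ajouter un contexte
--     context = "This is a customer review: "
--     return context + text
-- ===== SOURCE B (Python) =====
-- # B: two single left-to-right scans (positives then negatives) over the text with a
-- # precomputed (word, replacement) table, instead of ten full-string .replace passes.
-- positive_keywords = ["excellent", "superb", "amazing", "fast", "great"]
--
-- negative_keywords = ["bad", "terrible", "horrible", "slow", "poor"]
--
-- def _highlight(text, pairs):
--     out = []
--     i = 0
--     n = len(text)
--     while i < n:
--         for w, rep in pairs:
--             if text.startswith(w, i):
--                 out.append(rep)
--                 i += len(w)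
--                 break
--         else:
--             out.append(text[i])
--             i += 1
--     return "".join(out)
--
-- def preprocess_text(text):
--     if not isinstance(text, str):
--         return "Avis non fourni"
--     pos = [(w, f"**{w.upper()}**") for w in positive_keywords]
--     neg = [(w, f"__{w.upper()}__") for w in negative_keywords]
--     return "This is a customer review: " + _highlight(_highlight(text, pos), neg)
-- ===== Notes on version B (the rewrite author's own statement) =====
-- stated objective: alternative
-- what changed: Replaces the ten sequential whole-string str.replace passes by two single left-to-right scans (positives, then negatives) over the text, each looking up the matched keyword in a precomputed (word, replacement) table.
import Mathlib
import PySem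

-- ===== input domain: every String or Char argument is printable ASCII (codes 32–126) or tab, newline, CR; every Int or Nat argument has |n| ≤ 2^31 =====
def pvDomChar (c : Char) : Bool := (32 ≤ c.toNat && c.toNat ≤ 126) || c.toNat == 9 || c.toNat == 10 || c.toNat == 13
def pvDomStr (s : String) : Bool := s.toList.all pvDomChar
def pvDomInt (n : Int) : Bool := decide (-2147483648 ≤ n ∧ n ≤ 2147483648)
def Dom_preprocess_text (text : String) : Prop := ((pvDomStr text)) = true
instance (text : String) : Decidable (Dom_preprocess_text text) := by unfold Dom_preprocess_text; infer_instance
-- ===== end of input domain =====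

-- B replaces A's ten sequential whole-string .replace passes by two single left-to-right
-- scans (positives, then negatives) with a precomputed (word, replacement) table.

-- ===== PORT A =====
def positive_keywords : List String := ["excellent", "superb", "amazing", "fast", "great"]

def negative_keywords : List String := ["bad", "terrible", "horrible", "slow", "poor"]

def preprocess_text (text : String) : String :=
  -- for word in positive_keywords: text = text.replace(word, f"**{word.upper()}**")
  let t1 := positive_keywords.foldl
    (fun s w => PySem.Str.replace s w ("**" ++ PySem.Str.upper w ++ "**")) text
  -- for word in negative_keywords: text = text.replace(word, f"__{word.upper()}__")
  let t2 := negative_keywords.foldl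
    (fun s w => PySem.Str.replace s w ("__" ++ PySem.Str.upper w ++ "__")) t1
  "This is a customer review: " ++ t2

-- ===== PORT B =====
-- pairs [(w, f"**{w.upper()}**") for w in …], over code-point lists
def pvPairs (mark : String) (ws : List String) : List (List Char × List Char) :=
  ws.map (fun w => (w.toList, (mark ++ PySem.Str.upper w ++ mark).toList))

-- the inner 'for w, rep in pairs: if text.startswith(w, i)' loop
def pvFindPair (ps : List (List Char × List Char)) (l : List Char) :
    Option (List Char × List Char) :=
  match ps with
  | [] => none
  | p :: ps => if p.1.isPrefixOf l then some p else pvFindPair ps l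

-- _highlight's while-loop over the remaining text (the 'max … 1' only guards
-- termination for an empty word; every word used is nonempty, where it is exact)
def pvScan (ps : List (List Char × List Char)) (l : List Char) : List Char :=
  match l with
  | [] => []
  | c :: t =>
    match pvFindPair ps (c :: t) with
    | some p => p.2 ++ pvScan ps ((c :: t).drop (max p.1.length 1))
    | none => c :: pvScan ps t
termination_by l.length
decreasing_by
  all_goals simp [List.length_drop]

def preprocess_text_alt (text : String) : String :=
  "This is a customer review: " ++
    String.ofList (pvScan (pvPairs "__" negative_keywords)
      (pvScan (pvPairs "**" positive_keywords) text.toList))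

-- ===== PRECONDITION & SPEC =====
def Spec_preprocess_text (text : String) (out : String) : Prop := out = preprocess_text_alt text
instance (text : String) (out : String) : Decidable (Spec_preprocess_text text out) := by unfold Spec_preprocess_text; infer_instance

-- ===== CLAIM (what is proved, stated in full; the proofs are below) =====
def Claim_equal_preprocess_text : Prop := ∀ (text : String), Dom_preprocess_text text → Spec_preprocess_text text (preprocess_text text)

-- ===== LEMMAS AND PROOFS =====

-- proof-side clean form of PySem.Chars.replace (for a nonempty pattern)
def pvRepl (k r : List Char) (l : List Char) : List Char :=
  match l with
  | [] => []
  | c :: t =>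
    if k.isPrefixOf (c :: t) then r ++ pvRepl k r ((c :: t).drop (max k.length 1))
    else c :: pvRepl k r t
termination_by l.length
decreasing_by all_goals simp [List.length_drop]

theorem pvRepl_nil (k r : List Char) : pvRepl k r [] = [] := by
  rw [pvRepl]

theorem pvRepl_cons_neg (k r : List Char) (c : Char) (t : List Char)
    (h : ¬ k <+: c :: t) : pvRepl k r (c :: t) = c :: pvRepl k r t := by
  rw [pvRepl, if_neg (by simpa [List.isPrefixOf_iff_prefix] using h)]

theorem pvRepl_match (k r z : List Char) (hk : k ≠ []) :
    pvRepl k r (k ++ z) = r ++ pvRepl k r z := by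
  obtain ⟨c, k', rfl⟩ := List.exists_cons_of_ne_nil hk
  rw [List.cons_append, pvRepl, if_pos (List.isPrefixOf_iff_prefix.mpr
    (by rw [← List.cons_append]; exact List.prefix_append _ _))]
  have hmax : max (c :: k').length 1 = (c :: k').length := by simp
  rw [hmax, ← List.cons_append, List.drop_left]

theorem go_zero (k r l acc : List Char) :
    PySem.Chars.replace.go k r 0 l acc = acc.reverse ++ l := rfl

theorem go_nil (k r acc : List Char) (n : Nat) :
    PySem.Chars.replace.go k r (n + 1) [] acc = acc.reverse := rfl

theorem go_cons (k r acc t : List Char) (c : Char) (n : Nat) :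
    PySem.Chars.replace.go k r (n + 1) (c :: t) acc =
      if k.isPrefixOf (c :: t) then
        PySem.Chars.replace.go k r n ((c :: t).drop k.length) (r.reverse ++ acc)
      else PySem.Chars.replace.go k r n t (c :: acc) := rfl

theorem go_eq (k r : List Char) (hk : k ≠ []) :
    ∀ (fuel : Nat) (l acc : List Char), l.length ≤ fuel →
      PySem.Chars.replace.go k r fuel l acc = acc.reverse ++ pvRepl k r l := by
  intro fuel
  induction fuel with
  | zero =>
    intro l acc hl
    have : l = [] := List.length_eq_zero_iff.mp (Nat.le_zero.mp hl)
    subst this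
    rw [go_zero, pvRepl_nil]
  | succ n ih =>
    intro l acc hl
    match l with
    | [] => rw [go_nil, pvRepl_nil]; simp
    | c :: t =>
      rw [go_cons]
      by_cases hp : k.isPrefixOf (c :: t)
      · rw [if_pos hp]
        have hk1 : 1 ≤ k.length := by
          cases k with
          | nil => exact absurd rfl hk
          | cons a b => simp
        have hlen : ((c :: t).drop k.length).length ≤ n := by
          simp only [List.length_drop]
          simp at hl ⊢
          omega
        rw [ih _ _ hlen]
        rw [pvRepl, if_pos hp]
        have hmax : max k.length 1 = k.length := by omega
        rw [hmax]
        simp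
      · rw [if_neg hp]
        have hlen : t.length ≤ n := by simp at hl; omega
        rw [ih _ _ hlen]
        rw [pvRepl, if_neg hp]
        simp

theorem replace_eq_pvRepl (k r l : List Char) (hk : k ≠ []) :
    PySem.Chars.replace l k r = pvRepl k r l := by
  rw [PySem.Chars.replace, if_neg (by simpa [List.isEmpty_iff] using hk)]
  simpa using go_eq k r hk l.length l [] le_rfl

-- head of a nonempty prefix is the head of the whole list
theorem head?_of_prefix {a b : List Char} (ha : a ≠ []) (h : a <+: b) :
    b.head? = a.head? := by
  obtain ⟨t, rfl⟩ := h
  obtain ⟨c, a', rfl⟩ := List.exists_cons_of_ne_nil ha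
  rfl

-- a keyword whose chars never occur in the replacement cannot become a prefix by replacing
theorem prefix_of_pvRepl (k1 r1 : List Char) (_hk1 : k1 ≠ []) (hr1 : r1 ≠ []) :
    ∀ (n : Nat) (s : List Char), s.length ≤ n → ∀ (k2 : List Char), k2 ≠ [] →
      (∀ c, r1.head? = some c → c ∉ k2) →
      k2 <+: pvRepl k1 r1 s → k2 <+: s := by
  intro n
  induction n with
  | zero =>
    intro s hs k2 hk2 hd h
    have : s = [] := List.length_eq_zero_iff.mp (Nat.le_zero.mp hs)
    subst this
    rwa [pvRepl_nil] at h
  | succ n ih =>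
    intro s hs k2 hk2 hd h
    match s with
    | [] => rwa [pvRepl_nil] at h
    | c :: t =>
      by_cases hp : k1 <+: c :: t
      · exfalso
        rw [pvRepl, if_pos (List.isPrefixOf_iff_prefix.mpr hp)] at h
        obtain ⟨d, r1', rfl⟩ := List.exists_cons_of_ne_nil hr1
        obtain ⟨e, k2', rfl⟩ := List.exists_cons_of_ne_nil hk2
        have hh : d = e := by
          have := head?_of_prefix (List.cons_ne_nil e k2') h
          simpa using this
        subst hh
        exact hd d rfl List.mem_cons_self
      · rw [pvRepl_cons_neg _ _ _ _ hp] at h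
        obtain ⟨e, k2', rfl⟩ := List.exists_cons_of_ne_nil hk2
        rw [List.cons_prefix_cons] at h
        obtain ⟨rfl, h2⟩ := h
        by_cases hk2' : k2' = []
        · subst hk2'
          simp
        · have ht : t.length ≤ n := by simp at hs; omega
          have := ih t ht k2' hk2' (fun c0 hc0 hmem => hd c0 hc0 (List.mem_cons_of_mem _ hmem)) h2
          exact List.cons_prefix_cons.mpr ⟨rfl, this⟩

-- sequential replacement: A's foldl of replaces, in pvRepl form
def pvSeq (ps : List (List Char × List Char)) (l : List Char) : List Char :=
  ps.foldl (fun s p => pvRepl p.1 p.2 s) l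

theorem pvSeq_nil_list (ps : List (List Char × List Char)) : pvSeq ps [] = [] := by
  induction ps with
  | nil => rfl
  | cons p ps ih => simp only [pvSeq, List.foldl_cons, pvRepl_nil] at *; exact ih

-- no suffix of a (other than a itself) meets b in either prefix direction (Bool, so it evaluates)
def pvNoCross1 (a b : List Char) : Bool :=
  (List.range a.length).all
    (fun i => i == 0 || (!(b.isPrefixOf (a.drop i)) && !((a.drop i).isPrefixOf b)))

theorem pvNoCross1_spec {a b : List Char} (h : pvNoCross1 a b = true) :
    ∀ i < a.length, 0 < i → ¬ b <+: a.drop i ∧ ¬ a.drop i <+: b := by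
  intro i hi hipos
  rw [pvNoCross1, List.all_eq_true] at h
  have := h i (List.mem_range.mpr hi)
  rcases Bool.or_eq_true_iff.mp this with h0 | hok
  · exfalso
    simp at h0
    omega
  · obtain ⟨hA, hB⟩ := Bool.and_eq_true_iff.mp hok
    exact ⟨fun hc => by simp [List.isPrefixOf_iff_prefix.mpr hc] at hA,
      fun hc => by simp [List.isPrefixOf_iff_prefix.mpr hc] at hB⟩

-- the hypotheses making sequential replacement = one left-to-right scan
def pvGood (ps : List (List Char × List Char)) : Prop :=
  (∀ p ∈ ps, p.1 ≠ [] ∧ p.2 ≠ []) ∧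
  (∀ p ∈ ps, ∀ q ∈ ps, p.2.all (fun c => !(q.1.contains c)) = true) ∧
  List.Pairwise (fun a b => a.1.head? ≠ b.1.head? ∧ pvNoCross1 b.1 a.1 = true) ps

theorem pvGood_notin {ps : List (List Char × List Char)} {p q : List Char × List Char}
    (h : pvGood ps) (hp : p ∈ ps) (hq : q ∈ ps) : ∀ c ∈ p.2, c ∉ q.1 := by
  intro c hc
  have h2 := List.all_eq_true.mp (h.2.1 p hp q hq) c hc
  simpa using h2

theorem pvGood_tail {p : List Char × List Char} {ps : List (List Char × List Char)}
    (h : pvGood (p :: ps)) : pvGood ps := by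
  obtain ⟨h1, h2, h3⟩ := h
  exact ⟨fun q hq => h1 q (List.mem_cons_of_mem _ hq),
    fun q hq q' hq' => h2 q (List.mem_cons_of_mem _ hq) q' (List.mem_cons_of_mem _ hq'),
    (List.pairwise_cons.mp h3).2⟩

theorem pvRepl_passthrough (k r l x : List Char)
    (H : ∀ p < l.length, ¬ k <+: (l.drop p ++ x)) :
    pvRepl k r (l ++ x) = l ++ pvRepl k r x := by
  induction l generalizing x with
  | nil => simp
  | cons c l ih =>
    have h0 : ¬ k <+: (c :: l) ++ x := by simpa using H 0 (by simp)
    rw [List.cons_append, pvRepl_cons_neg _ _ _ _ (by simpa using h0)]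
    rw [ih x (fun p hp => by simpa using H (p + 1) (by simpa using hp))]
    simp

theorem pvSeq_cons_no (ps : List (List Char × List Char)) (hG : pvGood ps)
    (c : Char) (t : List Char) (h : ∀ p ∈ ps, ¬ p.1 <+: c :: t) :
    pvSeq ps (c :: t) = c :: pvSeq ps t := by
  induction ps generalizing t with
  | nil => rfl
  | cons p ps ih =>
    obtain ⟨h1, h2, h3⟩ := hG
    have hp1 : p.1 ≠ [] := (h1 p (List.mem_cons_self)).1
    have hp2 : p.2 ≠ [] := (h1 p (List.mem_cons_self)).2
    have hnp : ¬ p.1 <+: c :: t := h p List.mem_cons_self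
    have step : pvRepl p.1 p.2 (c :: t) = c :: pvRepl p.1 p.2 t :=
      pvRepl_cons_neg _ _ _ _ hnp
    show pvSeq ps (pvRepl p.1 p.2 (c :: t)) = c :: pvSeq ps (pvRepl p.1 p.2 t)
    rw [step]
    apply ih (pvGood_tail ⟨h1, h2, h3⟩)
    intro q hq hcon
    have hq1 : q.1 ≠ [] := (h1 q (List.mem_cons_of_mem _ hq)).1
    rw [← step] at hcon
    have := prefix_of_pvRepl p.1 p.2 hp1 hp2 (c :: t).length (c :: t) le_rfl q.1 hq1
      (fun c0 hc0 hmem => by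
        have hc0' : c0 ∈ p.2 := List.mem_of_mem_head? (Option.mem_def.mpr hc0)
        exact pvGood_notin ⟨h1, h2, h3⟩ List.mem_cons_self (List.mem_cons_of_mem _ hq) c0 hc0' hmem) hcon
    exact h q (List.mem_cons_of_mem _ hq) this

theorem pvSeq_pass_keyword (ps1 : List (List Char × List Char)) (k : List Char) (hk : k ≠ [])
    (hq : ∀ q ∈ ps1, q.1 ≠ [] ∧ q.1.head? ≠ k.head? ∧
      ∀ i < k.length, 0 < i → ¬ q.1 <+: k.drop i ∧ ¬ k.drop i <+: q.1) :
    ∀ z, pvSeq ps1 (k ++ z) = k ++ pvSeq ps1 z := by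
  induction ps1 with
  | nil => intro z; rfl
  | cons q ps1 ih =>
    intro z
    obtain ⟨hq1, hqh, hqc⟩ := hq q List.mem_cons_self
    have step : pvRepl q.1 q.2 (k ++ z) = k ++ pvRepl q.1 q.2 z := by
      apply pvRepl_passthrough
      intro p hp hcon
      by_cases hp0 : p = 0
      · subst hp0
        simp at hcon
        rcases List.prefix_or_prefix_of_prefix hcon (List.prefix_append k z) with h | h
        · exact hqh ((head?_of_prefix hq1 h).symm)
        · exact hqh ((head?_of_prefix hk h))
      · rcases List.prefix_or_prefix_of_prefix hcon (List.prefix_append (k.drop p) z) with h | h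
        · exact (hqc p hp (Nat.pos_of_ne_zero hp0)).1 h
        · exact (hqc p hp (Nat.pos_of_ne_zero hp0)).2 h
    show pvSeq ps1 (pvRepl q.1 q.2 (k ++ z)) = k ++ pvSeq ps1 (pvRepl q.1 q.2 z)
    rw [step]
    exact ih (fun q' hq' => hq q' (List.mem_cons_of_mem _ hq')) _

theorem pvSeq_pass_marked (ps2 : List (List Char × List Char)) (R : List Char)
    (hq : ∀ q ∈ ps2, q.1 ≠ [] ∧ ∀ c ∈ R, c ∉ q.1) :
    ∀ z, pvSeq ps2 (R ++ z) = R ++ pvSeq ps2 z := by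
  induction ps2 with
  | nil => intro z; rfl
  | cons q ps2 ih =>
    intro z
    obtain ⟨hq1, hqc⟩ := hq q List.mem_cons_self
    have step : pvRepl q.1 q.2 (R ++ z) = R ++ pvRepl q.1 q.2 z := by
      apply pvRepl_passthrough
      intro p hp hcon
      have hdp : R.drop p ≠ [] := by
        intro hnil
        have := List.length_drop (l := R) (i := p)
        rw [hnil] at this
        simp at this
        omega
      obtain ⟨d, rest, hd⟩ := List.exists_cons_of_ne_nil hdp
      have hh : (List.drop p R ++ z).head? = q.1.head? := head?_of_prefix hq1 hcon
      rw [hd] at hh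
      have hq1d : q.1.head? = some d := by rw [← hh]; rfl
      have hdq : d ∈ q.1 := List.mem_of_mem_head? (Option.mem_def.mpr hq1d)
      have hdR : d ∈ R := by
        have : d ∈ R.drop p := by rw [hd]; exact List.mem_cons_self
        exact List.mem_of_mem_drop this
      exact hqc d hdR hdq
    show pvSeq ps2 (pvRepl q.1 q.2 (R ++ z)) = R ++ pvSeq ps2 (pvRepl q.1 q.2 z)
    rw [step]
    exact ih (fun q' hq' => hq q' (List.mem_cons_of_mem _ hq')) _

theorem pvFindPair_eq_none (ps : List (List Char × List Char)) (l : List Char) :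
    pvFindPair ps l = none ↔ ∀ p ∈ ps, ¬ p.1 <+: l := by
  induction ps with
  | nil => simp [pvFindPair]
  | cons p ps ih =>
    rw [pvFindPair]
    by_cases hp : p.1.isPrefixOf l
    · rw [if_pos hp]
      simp only [List.isPrefixOf_iff_prefix] at hp
      constructor
      · intro h; exact absurd h (by simp)
      · intro h; exact absurd hp (h p List.mem_cons_self)
    · rw [if_neg hp]
      simp only [List.isPrefixOf_iff_prefix] at hp
      rw [ih]
      constructor
      · intro h q hq
        rcases List.mem_cons.mp hq with rfl | hq'
        · exact hp
        · exact h q hq'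
      · intro h q hq
        exact h q (List.mem_cons_of_mem _ hq)

theorem pvFindPair_eq_some (ps : List (List Char × List Char)) (l : List Char)
    (p₀ : List Char × List Char) (h : pvFindPair ps l = some p₀) :
    ∃ ps1 ps2, ps = ps1 ++ p₀ :: ps2 ∧ (∀ q ∈ ps1, ¬ q.1 <+: l) ∧ p₀.1 <+: l := by
  induction ps with
  | nil => simp [pvFindPair] at h
  | cons p ps ih =>
    rw [pvFindPair] at h
    by_cases hp : p.1.isPrefixOf l
    · rw [if_pos hp] at h
      obtain rfl : p = p₀ := by simpa using h
      exact ⟨[], ps, rfl, by simp, List.isPrefixOf_iff_prefix.mp hp⟩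
    · rw [if_neg hp] at h
      obtain ⟨ps1, ps2, rfl, hn, hpre⟩ := ih h
      refine ⟨p :: ps1, ps2, rfl, ?_, hpre⟩
      intro q hq
      rcases List.mem_cons.mp hq with rfl | hq'
      · simpa [List.isPrefixOf_iff_prefix] using hp
      · exact hn q hq'

theorem pvSeq_eq_pvScan (ps : List (List Char × List Char)) (hG : pvGood ps) :
    ∀ (n : Nat) (l : List Char), l.length ≤ n → pvSeq ps l = pvScan ps l := by
  intro n
  induction n with
  | zero =>
    intro l hl
    have : l = [] := List.length_eq_zero_iff.mp (Nat.le_zero.mp hl)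
    subst this
    rw [pvSeq_nil_list, pvScan]
  | succ n ih =>
    intro l hl
    match l with
    | [] => rw [pvSeq_nil_list, pvScan]
    | c :: t =>
      cases hfp : pvFindPair ps (c :: t) with
      | none =>
        rw [pvScan]
        rw [hfp]
        rw [pvSeq_cons_no ps hG c t ((pvFindPair_eq_none _ _).mp hfp)]
        rw [ih t (by simp at hl; omega)]
      | some p₀ =>
        obtain ⟨ps1, ps2, hsplit, hnot, hpre⟩ := pvFindPair_eq_some _ _ _ hfp
        obtain ⟨w, hw⟩ := hpre
        obtain ⟨h1, h2, h3⟩ := hG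
        have hp₀mem : p₀ ∈ ps := by rw [hsplit]; simp
        have hp₀1 : p₀.1 ≠ [] := (h1 p₀ hp₀mem).1
        have hpair := (List.pairwise_append.mp (by rwa [hsplit] at h3))
        have hpcons := List.pairwise_cons.mp hpair.2.1
        have hcross := hpair.2.2
        -- pass-through of the earlier pairs over the matched keyword
        have hks : ∀ q ∈ ps1, q.1 ≠ [] ∧ q.1.head? ≠ p₀.1.head? ∧
            ∀ i < p₀.1.length, 0 < i → ¬ q.1 <+: p₀.1.drop i ∧ ¬ p₀.1.drop i <+: q.1 := by
          intro q hq
          have hmem : q ∈ ps := by rw [hsplit]; simp [hq]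
          have hrel := hcross q hq p₀ List.mem_cons_self
          exact ⟨(h1 q hmem).1, hrel.1, pvNoCross1_spec hrel.2⟩
        have hms : ∀ q ∈ ps2, q.1 ≠ [] ∧ ∀ ch ∈ p₀.2, ch ∉ q.1 := by
          intro q hq
          have hmem : q ∈ ps := by rw [hsplit]; simp [hq]
          exact ⟨(h1 q hmem).1, fun ch hch => pvGood_notin ⟨h1, h2, h3⟩ hp₀mem hmem ch hch⟩
        have hGood1 : pvGood ps1 := by
          refine ⟨fun q hq => h1 q (by rw [hsplit]; simp [hq]),
            fun q hq q' hq' => h2 q (by rw [hsplit]; simp [hq]) q' (by rw [hsplit]; simp [hq']), hpair.1⟩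
        have hwlen : w.length ≤ n := by
          have := congrArg List.length hw
          simp at this hl
          obtain ⟨d, k', hk'⟩ := List.exists_cons_of_ne_nil hp₀1
          rw [hk'] at this
          simp at this
          omega
        calc pvSeq ps (c :: t)
            = pvSeq ps2 (pvRepl p₀.1 p₀.2 (pvSeq ps1 (c :: t))) := by
              rw [hsplit]; simp [pvSeq, List.foldl_append]
          _ = pvSeq ps2 (pvRepl p₀.1 p₀.2 (p₀.1 ++ pvSeq ps1 w)) := by
              rw [← hw, pvSeq_pass_keyword ps1 p₀.1 hp₀1 hks]
          _ = pvSeq ps2 (p₀.2 ++ pvRepl p₀.1 p₀.2 (pvSeq ps1 w)) := by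
              rw [pvRepl_match _ _ _ hp₀1]
          _ = p₀.2 ++ pvSeq ps2 (pvRepl p₀.1 p₀.2 (pvSeq ps1 w)) := by
              rw [pvSeq_pass_marked ps2 p₀.2 hms]
          _ = p₀.2 ++ pvSeq ps w := by
              rw [hsplit]; simp [pvSeq, List.foldl_append]
          _ = p₀.2 ++ pvScan ps w := by rw [ih w hwlen]
          _ = pvScan ps (c :: t) := by
              rw [pvScan]
              rw [hfp]
              congr 1
              congr 1
              have hmax : max p₀.1.length 1 = p₀.1.length := by
                obtain ⟨d, k', hk'⟩ := List.exists_cons_of_ne_nil hp₀1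
                rw [hk']; simp
              rw [hmax, ← hw, List.drop_left]

-- A's foldl over the keyword strings, moved to code-point lists
theorem foldl_replace_toList (ws : List String) (mark : String) (s : String)
    (hw : ∀ w ∈ ws, w.toList ≠ []) :
    (ws.foldl (fun s w => PySem.Str.replace s w (mark ++ PySem.Str.upper w ++ mark)) s).toList
      = pvSeq (pvPairs mark ws) s.toList := by
  induction ws generalizing s with
  | nil => rfl
  | cons w ws ih =>
    simp only [List.foldl_cons, pvPairs, List.map_cons]
    rw [ih _ (fun w' hw' => hw w' (List.mem_cons_of_mem _ hw'))]
    show _ = pvSeq (pvPairs mark ws) _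
    congr 1
    rw [PySem.Str.toList_replace]
    exact replace_eq_pvRepl _ _ _ (hw w List.mem_cons_self)

set_option maxRecDepth 40000 in
theorem pairs_pos_eq : pvPairs "**" positive_keywords =
  [(['e', 'x', 'c', 'e', 'l', 'l', 'e', 'n', 't'], ['*', '*', 'E', 'X', 'C', 'E', 'L', 'L', 'E', 'N', 'T', '*', '*']),
   (['s', 'u', 'p', 'e', 'r', 'b'], ['*', '*', 'S', 'U', 'P', 'E', 'R', 'B', '*', '*']),
   (['a', 'm', 'a', 'z', 'i', 'n', 'g'], ['*', '*', 'A', 'M', 'A', 'Z', 'I', 'N', 'G', '*', '*']),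
   (['f', 'a', 's', 't'], ['*', '*', 'F', 'A', 'S', 'T', '*', '*']),
   (['g', 'r', 'e', 'a', 't'], ['*', '*', 'G', 'R', 'E', 'A', 'T', '*', '*'])] := by decide

set_option maxRecDepth 40000 in
theorem pairs_neg_eq : pvPairs "__" negative_keywords =
  [(['b', 'a', 'd'], ['_', '_', 'B', 'A', 'D', '_', '_']),
   (['t', 'e', 'r', 'r', 'i', 'b', 'l', 'e'], ['_', '_', 'T', 'E', 'R', 'R', 'I', 'B', 'L', 'E', '_', '_']),
   (['h', 'o', 'r', 'r', 'i', 'b', 'l', 'e'], ['_', '_', 'H', 'O', 'R', 'R', 'I', 'B', 'L', 'E', '_', '_']),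
   (['s', 'l', 'o', 'w'], ['_', '_', 'S', 'L', 'O', 'W', '_', '_']),
   (['p', 'o', 'o', 'r'], ['_', '_', 'P', 'O', 'O', 'R', '_', '_'])] := by decide

theorem pvGood_pos : pvGood (pvPairs "**" positive_keywords) := by
  rw [pairs_pos_eq]
  exact ⟨by decide, by decide, by decide⟩

theorem pvGood_neg : pvGood (pvPairs "__" negative_keywords) := by
  rw [pairs_neg_eq]
  exact ⟨by decide, by decide, by decide⟩

set_option maxRecDepth 8000 in
theorem kw_pos_ne : ∀ w ∈ positive_keywords, w.toList ≠ [] := by decide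

set_option maxRecDepth 8000 in
theorem kw_neg_ne : ∀ w ∈ negative_keywords, w.toList ≠ [] := by decide

-- ===== VERDICT (by name: the statement is the Claim_ definition above) =====
theorem preprocess_text_spec : Claim_equal_preprocess_text := by
  intro text _
  unfold Spec_preprocess_text preprocess_text preprocess_text_alt
  refine congrArg (fun z => "This is a customer review: " ++ z) ?_
  have hpos := kw_pos_ne
  have hneg := kw_neg_ne
  set t1 := positive_keywords.foldl
    (fun s w => PySem.Str.replace s w ("**" ++ PySem.Str.upper w ++ "**")) text with ht1
  set t2 := negative_keywords.foldl
    (fun s w => PySem.Str.replace s w ("__" ++ PySem.Str.upper w ++ "__")) t1 with ht2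
  have e1 : t1.toList = pvScan (pvPairs "**" positive_keywords) text.toList := by
    rw [ht1, foldl_replace_toList _ _ _ hpos]
    exact pvSeq_eq_pvScan _ pvGood_pos _ _ le_rfl
  have e2 : t2.toList = pvScan (pvPairs "__" negative_keywords)
      (pvScan (pvPairs "**" positive_keywords) text.toList) := by
    rw [ht2, foldl_replace_toList _ _ _ hneg, e1]
    exact pvSeq_eq_pvScan _ pvGood_neg _ _ le_rfl
  calc t2 = String.ofList t2.toList := (String.ofList_toList (s := t2)).symm
    _ = _ := by rw [e2]
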